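-- pv_equiv track=rewrite | github.com/yuhe-dev/clip_dinoiser | visualize_feature_curve_overlay.py | _pick_image_rel
-- ===== SOURCE A (Python) =====
-- from typing import Dict, List
--
-- def _pick_image_rel(requested_image_rel: str, indexed_bundles: List[Dict[str, Dict[str, object]]]) -> str:
--     if requested_image_rel:
--         return requested_image_rel
--     common = set(indexed_bundles[0].keys())
--     for bundle in indexed_bundles[1:]:
--         common &= set(bundle.keys())
--     if not common:
--         raise ValueError("No shared image_rel found across processed bundles.")
--     return sorted(common)[0]
-- ===== SOURCE B (Python) =====
-- from typing import Dict, List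
--
-- def _pick_image_rel(requested_image_rel: str, indexed_bundles: List[Dict[str, Dict[str, object]]]) -> str:
--     if requested_image_rel:
--         return requested_image_rel
--     for key in sorted(indexed_bundles[0].keys()):
--         if all(key in bundle for bundle in indexed_bundles[1:]):
--             return key
--     raise ValueError("No shared image_rel found across processed bundles.")
-- ===== Notes on version B (the rewrite author's own statement) =====
-- stated objective: alternative
-- what changed: Instead of intersecting all key sets and then sorting the intersection, B scans the first bundle's keys in sorted order and returns the first key contained in every other bundle (ordered short-circuit search); same early return and same exceptions.
import Mathlib
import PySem

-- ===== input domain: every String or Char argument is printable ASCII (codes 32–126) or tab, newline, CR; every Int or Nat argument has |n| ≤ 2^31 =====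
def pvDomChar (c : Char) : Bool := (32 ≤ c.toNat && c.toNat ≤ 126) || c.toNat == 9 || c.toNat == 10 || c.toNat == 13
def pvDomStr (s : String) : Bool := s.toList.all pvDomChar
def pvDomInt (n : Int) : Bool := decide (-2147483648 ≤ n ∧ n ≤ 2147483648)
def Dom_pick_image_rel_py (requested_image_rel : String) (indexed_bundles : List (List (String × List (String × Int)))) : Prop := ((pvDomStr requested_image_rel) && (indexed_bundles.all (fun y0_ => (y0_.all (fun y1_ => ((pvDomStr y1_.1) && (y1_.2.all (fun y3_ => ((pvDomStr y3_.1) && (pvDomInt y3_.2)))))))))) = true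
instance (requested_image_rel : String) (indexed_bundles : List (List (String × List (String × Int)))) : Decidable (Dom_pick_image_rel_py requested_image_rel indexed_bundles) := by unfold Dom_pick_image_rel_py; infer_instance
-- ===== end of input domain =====

-- B replaces "intersect all key sets, sort, take the first" by an ordered short-circuit
-- search over the sorted keys of the first bundle (alternative decomposition, same behaviour).

-- ===== PORT A =====
-- literal port of _pick_image_rel: build the intersection of key sets, sort it, return its head
def pick_image_rel_py (requested_image_rel : String) (indexed_bundles : List (List (String × List (String × Int)))) : String :=
  if requested_image_rel ≠ "" then requested_image_rel
  else
    match indexed_bundles with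
    | [] => ""  -- IndexError in Python (indexed_bundles[0]); excluded by Pre_
    | b0 :: rest =>
      let common := rest.foldl
        (fun c b => PySem.Set.inter c (PySem.Set.ofList (b.map Prod.fst)))
        (PySem.Set.ofList (b0.map Prod.fst))
      match PySem.List.sorted common (fun x => x) false with
      | [] => ""  -- ValueError in Python; excluded by Pre_
      | m :: _ => m

-- ===== PORT B =====
-- the 'for key in sorted(...): if all(key in b ...): return key' loop of Source B
def pvFirstShared (keys : List String) (rest : List (List (String × List (String × Int)))) : String :=
  match keys with
  | [] => ""  -- ValueError in Python; excluded by Pre_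
  | k :: ks =>
    if rest.all (fun b => (b.map Prod.fst).contains k) then k
    else pvFirstShared ks rest

def pick_image_rel_py_alt (requested_image_rel : String) (indexed_bundles : List (List (String × List (String × Int)))) : String :=
  if requested_image_rel ≠ "" then requested_image_rel
  else
    match indexed_bundles with
    | [] => ""  -- IndexError in Python; excluded by Pre_
    | b0 :: rest =>
      pvFirstShared (PySem.List.sorted (PySem.Set.ofList (b0.map Prod.fst)) (fun x => x) false) rest

-- ===== PRECONDITION & SPEC =====
-- Pre_ excludes exactly the inputs where A raises: empty requested_image_rel with an empty
-- bundle list (IndexError) or with no key shared by every bundle (ValueError).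
def Pre_pick_image_rel_py (requested_image_rel : String) (indexed_bundles : List (List (String × List (String × Int)))) : Prop :=
  requested_image_rel ≠ "" ∨
    (indexed_bundles ≠ [] ∧
      ∃ k ∈ (indexed_bundles.headD []).map Prod.fst, ∀ b ∈ indexed_bundles, k ∈ b.map Prod.fst)
instance (requested_image_rel : String) (indexed_bundles : List (List (String × List (String × Int)))) : Decidable (Pre_pick_image_rel_py requested_image_rel indexed_bundles) := by unfold Pre_pick_image_rel_py; infer_instance

def pvWitness_pick_image_rel_py : String × (List (List (String × List (String × Int)))) :=
  ("", [[("img/a.png", [("x", 1)])], [("img/a.png", [])]])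

def Spec_pick_image_rel_py (requested_image_rel : String) (indexed_bundles : List (List (String × List (String × Int)))) (out : String) : Prop := out = pick_image_rel_py_alt requested_image_rel indexed_bundles
instance (requested_image_rel : String) (indexed_bundles : List (List (String × List (String × Int)))) (out : String) : Decidable (Spec_pick_image_rel_py requested_image_rel indexed_bundles out) := by unfold Spec_pick_image_rel_py; infer_instance

-- ===== CLAIM (what is proved, stated in full; the proofs are below) =====
def Claim_equal_pick_image_rel_py : Prop := ∀ (requested_image_rel : String) (indexed_bundles : List (List (String × List (String × Int)))), Dom_pick_image_rel_py requested_image_rel indexed_bundles → Pre_pick_image_rel_py requested_image_rel indexed_bundles → Spec_pick_image_rel_py requested_image_rel indexed_bundles (pick_image_rel_py requested_image_rel indexed_bundles)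

-- ===== LEMMAS AND PROOFS =====

-- membership in A's running intersection
lemma pv_mem_foldl_inter (rest : List (List (String × List (String × Int)))) (c : List String) (k : String) :
    k ∈ rest.foldl (fun c b => PySem.Set.inter c (PySem.Set.ofList (b.map Prod.fst))) c ↔
      k ∈ c ∧ ∀ b ∈ rest, k ∈ b.map Prod.fst := by
  induction rest generalizing c with
  | nil => simp
  | cons b bs ih =>
    simp only [List.foldl_cons, ih, PySem.Set.mem_inter, PySem.Set.mem_ofList, List.mem_cons]
    constructor
    · rintro ⟨⟨h1, h2⟩, h3⟩
      exact ⟨h1, fun b' hb' => hb'.elim (fun e => e ▸ h2) (h3 b')⟩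
    · rintro ⟨h1, h2⟩
      exact ⟨⟨h1, h2 b (Or.inl rfl)⟩, fun b' hb' => h2 b' (Or.inr hb')⟩

-- B's loop returns the first (hence smallest, on a <-sorted list) shared key
lemma pv_firstShared_spec (keys : List String) (rest : List (List (String × List (String × Int))))
    (hp : keys.Pairwise (· < ·)) (y : String) (hy : y ∈ keys)
    (hpy : rest.all (fun b => (b.map Prod.fst).contains y) = true) :
    pvFirstShared keys rest ∈ keys ∧
      rest.all (fun b => (b.map Prod.fst).contains (pvFirstShared keys rest)) = true ∧
      pvFirstShared keys rest ≤ y := by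
  induction keys with
  | nil => cases hy
  | cons k ks ih =>
    rw [List.pairwise_cons] at hp
    by_cases h : rest.all (fun b => (b.map Prod.fst).contains k) = true
    · refine ⟨by simp only [pvFirstShared, if_pos h]; exact List.mem_cons_self,
        by simp only [pvFirstShared, if_pos h]; exact h, ?_⟩
      rcases List.mem_cons.mp hy with rfl | hy'
      · simp only [pvFirstShared, if_pos h]; exact le_refl y
      · simp only [pvFirstShared, if_pos h]
        exact le_of_lt (hp.1 y hy')
    · have hy' : y ∈ ks := by
        rcases List.mem_cons.mp hy with rfl | hy'
        · exact absurd hpy h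
        · exact hy'
      obtain ⟨h1, h2, h3⟩ := ih hp.2 hy'
      simp only [pvFirstShared, if_neg h]
      exact ⟨List.mem_cons_of_mem _ h1, h2, h3⟩

-- "all(key in b)" as a proposition
lemma pv_all_contains_iff (rest : List (List (String × List (String × Int)))) (k : String) :
    rest.all (fun b => (b.map Prod.fst).contains k) = true ↔ ∀ b ∈ rest, k ∈ b.map Prod.fst := by
  simp [List.all_eq_true]

-- ===== VERDICT (by name: the statement is the Claim_ definition above) =====
theorem pick_image_rel_py_spec : Claim_equal_pick_image_rel_py := by
  intro req bundles _ hpre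
  unfold Spec_pick_image_rel_py
  by_cases hreq : req ≠ ""
  · simp [pick_image_rel_py, pick_image_rel_py_alt, hreq]
  · rw [not_ne_iff] at hreq
    subst hreq
    rcases hpre with h | ⟨hne, k, hk0, hkall⟩
    · exact absurd rfl h
    cases bundles with
    | nil => exact absurd rfl hne
    | cons b0 rest =>
      simp only [List.headD_cons] at hk0
      -- shared facts
      have hkrest : ∀ b ∈ rest, k ∈ b.map Prod.fst := fun b hb => hkall b (List.mem_cons_of_mem _ hb)
      set common := rest.foldl
        (fun c b => PySem.Set.inter c (PySem.Set.ofList (b.map Prod.fst)))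
        (PySem.Set.ofList (b0.map Prod.fst)) with hcommon
      have hkcommon : k ∈ common := by
        rw [hcommon, pv_mem_foldl_inter, PySem.Set.mem_ofList]
        exact ⟨hk0, hkrest⟩
      -- sorted(common) is nonempty
      obtain ⟨m, t, hmt⟩ : ∃ m t, PySem.List.sorted common (fun x => x) false = m :: t := by
        cases hsc : PySem.List.sorted common (fun x => x) false with
        | nil =>
          rw [PySem.List.sorted_eq_nil_iff] at hsc
          rw [hsc] at hkcommon; cases hkcommon
        | cons m t => exact ⟨m, t, rfl⟩
      have hmcommon : m ∈ common := by
        have : m ∈ PySem.List.sorted common (fun x => x) false := by rw [hmt]; exact List.mem_cons_self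
        rwa [PySem.List.mem_sorted] at this
      have hmmin : ∀ y ∈ common, m ≤ y := PySem.List.key_head_sorted_le common (fun x => x) hmt
      obtain ⟨hm0, hmrest⟩ := (pv_mem_foldl_inter _ _ m).mp (hcommon ▸ hmcommon)
      rw [PySem.Set.mem_ofList] at hm0
      -- B's keys list
      set S := PySem.List.sorted (PySem.Set.ofList (b0.map Prod.fst)) (fun x => x) false with hS
      have hSp : S.Pairwise (· < ·) := PySem.List.sorted_ofList_pairwise_lt _
      have hmS : m ∈ S := by rw [hS, PySem.List.mem_sorted, PySem.Set.mem_ofList]; exact hm0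
      obtain ⟨h1, h2, h3⟩ := pv_firstShared_spec S rest hSp m hmS
        ((pv_all_contains_iff rest m).mpr hmrest)
      -- B's result is in common, hence ≥ m; with h3 (≤ m) they are equal
      have hBcommon : pvFirstShared S rest ∈ common := by
        rw [hcommon, pv_mem_foldl_inter, PySem.Set.mem_ofList]
        have : pvFirstShared S rest ∈ PySem.Set.ofList (b0.map Prod.fst) := by
          rw [← PySem.List.mem_sorted (key := fun x => x) (rev := false)]; exact h1
        rw [PySem.Set.mem_ofList] at this
        exact ⟨this, (pv_all_contains_iff rest _).mp h2⟩
      have : m = pvFirstShared S rest := le_antisymm (hmmin _ hBcommon) h3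
      simp only [pick_image_rel_py, pick_image_rel_py_alt, ne_eq, not_true_eq_false, if_false,
        ← hcommon, hmt, ← hS]
      exact this
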